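-- pv_equiv track=rewrite | github.com/macinn/Szemeredi-game | utils.py | find_winning_progression
-- ===== SOURCE A (Python) =====
-- def find_winning_progression(k: int, numbers: list[int]) -> list[int]:
--     s = set(numbers)
--     sorted_nums = sorted(s)
--     n = len(sorted_nums)
--     for i in range(n):
--         for j in range(i + 1, n):
--             d = sorted_nums[j] - sorted_nums[i]
--             prog = []
--             for m in range(k):
--                 candidate = sorted_nums[i] + m * d
--                 if candidate in s:
--                     prog.append(candidate)
--                 else:
--                     break
--             if len(prog) == k:
--                 return prog
--     return []
-- ===== SOURCE B (Python) =====
-- def find_winning_progression(k: int, numbers: list[int]) -> list[int]: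
--     s = set(numbers)
--     sorted_nums = sorted(s)
--     n = len(sorted_nums)
--     # run[(a, b)]: number of consecutive AP terms a, b, 2b-a, ... all present in s
--     run = {}
--     for i in range(n - 1, -1, -1):
--         for j in range(i + 1, n):
--             a, b = sorted_nums[i], sorted_nums[j]
--             c = 2 * b - a
--             run[(a, b)] = run[(b, c)] + 1 if c in s else 2
--     for i in range(n):
--         for j in range(i + 1, n):
--             a, b = sorted_nums[i], sorted_nums[j]
--             if run[(a, b)] >= k:
--                 d = b - a
--                 return [a + m * d for m in range(k)]
--     return []
-- ===== Notes on version B (the rewrite author's own statement) =====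
-- stated objective: alternative
-- what changed: Replaces A's per-pair term-by-term progression rebuilding (worst case O(n^2*k)) by a dynamic-programming dictionary run[(a,b)] of uncapped AP run lengths filled right-to-left over the sorted distinct values, then a scan for the first pair with run length >= k; not measurably faster on typical inputs because A's inner loop breaks early.
import Mathlib
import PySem

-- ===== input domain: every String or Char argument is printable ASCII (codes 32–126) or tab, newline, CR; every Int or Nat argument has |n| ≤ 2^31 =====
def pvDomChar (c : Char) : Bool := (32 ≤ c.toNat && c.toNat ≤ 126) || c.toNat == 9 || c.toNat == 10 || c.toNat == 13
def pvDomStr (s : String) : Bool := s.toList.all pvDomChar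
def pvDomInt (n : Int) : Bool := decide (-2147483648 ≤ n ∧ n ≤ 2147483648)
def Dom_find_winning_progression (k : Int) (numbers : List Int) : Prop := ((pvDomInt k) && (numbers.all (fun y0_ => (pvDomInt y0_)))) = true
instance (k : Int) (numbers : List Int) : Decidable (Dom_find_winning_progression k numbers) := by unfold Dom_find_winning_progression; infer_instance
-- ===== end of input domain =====

-- B replaces A's per-pair term-by-term progression rebuild by a DP dictionary of uncapped
-- AP run lengths over the sorted distinct values (alternative algorithm; equal return value proved).

-- ===== PORT A =====
-- inner 'for m in range(k)' loop: append candidates while present, break at the first absent one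
def pvProgLoopA (s : PySem.Set Int) (start d : Int) : List Int → List Int → List Int
  | [], prog => prog
  | m :: ms, prog =>
    if PySem.Set.contains s (start + m * d) then
      pvProgLoopA s start d ms (prog ++ [start + m * d])
    else prog

-- 'for j in range(i+1, n)' with early return
def pvJLoopA (k : Int) (s : PySem.Set Int) (v : List Int) (i : Int) : List Int → Option (List Int)
  | [] => none
  | j :: js =>
    let d := PySem.List.pyGetD v j 0 - PySem.List.pyGetD v i 0
    let prog := pvProgLoopA s (PySem.List.pyGetD v i 0) d (PySem.List.pyRange 0 k 1) []
    if (prog.length : Int) = k then some prog else pvJLoopA k s v i js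

-- 'for i in range(n)' with early return
def pvILoopA (k : Int) (s : PySem.Set Int) (v : List Int) : List Int → Option (List Int)
  | [] => none
  | i :: is =>
    match pvJLoopA k s v i (PySem.List.pyRange (i + 1) (v.length : Int) 1) with
    | some p => some p
    | none => pvILoopA k s v is

def find_winning_progression (k : Int) (numbers : List Int) : List Int :=
  let s := PySem.Set.ofList numbers
  let sorted_nums := PySem.List.sorted s (fun x => x) false
  let n : Int := (sorted_nums.length : Int)
  (pvILoopA k s sorted_nums (PySem.List.pyRange 0 n 1)).getD []

-- ===== PORT B =====
-- DP phase: run[(a,b)] = run[(b,2b-a)] + 1 if 2b-a in s else 2, pairs filled with i descending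
def pvBuildB (s : PySem.Set Int) (v : List Int) : PySem.Dict (Int × Int) Int :=
  (PySem.List.pyRange ((v.length : Int) - 1) (-1) (-1)).foldl (fun run i =>
    (PySem.List.pyRange (i + 1) (v.length : Int) 1).foldl (fun run j =>
      let a := PySem.List.pyGetD v i 0
      let b := PySem.List.pyGetD v j 0
      let c := 2 * b - a
      PySem.Dict.insert run (a, b)
        (if PySem.Set.contains s c then PySem.Dict.getD run (b, c) 0 + 1 else 2)) run)
    PySem.Dict.empty

-- scan phase, 'for j in range(i+1, n)' with early return
-- (Python's run[(a,b)] is Dict.getD _ _ 0: the key is always present — proved in pvBuildB_spec below)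
def pvScanBJ (k : Int) (v : List Int) (run : PySem.Dict (Int × Int) Int) (i : Int) :
    List Int → Option (List Int)
  | [] => none
  | j :: js =>
    let a := PySem.List.pyGetD v i 0
    let b := PySem.List.pyGetD v j 0
    if k ≤ PySem.Dict.getD run (a, b) 0 then
      some ((PySem.List.pyRange 0 k 1).map (fun m => a + m * (b - a)))
    else pvScanBJ k v run i js

-- scan phase, 'for i in range(n)' with early return
def pvScanBI (k : Int) (v : List Int) (run : PySem.Dict (Int × Int) Int) :
    List Int → Option (List Int)
  | [] => none
  | i :: is =>
    match pvScanBJ k v run i (PySem.List.pyRange (i + 1) (v.length : Int) 1) with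
    | some p => some p
    | none => pvScanBI k v run is

def find_winning_progression_alt (k : Int) (numbers : List Int) : List Int :=
  let s := PySem.Set.ofList numbers
  let sorted_nums := PySem.List.sorted s (fun x => x) false
  let run := pvBuildB s sorted_nums
  (pvScanBI k sorted_nums run (PySem.List.pyRange 0 (sorted_nums.length : Int) 1)).getD []

-- ===== PRECONDITION & SPEC =====
def Spec_find_winning_progression (k : Int) (numbers : List Int) (out : List Int) : Prop := out = find_winning_progression_alt k numbers
instance (k : Int) (numbers : List Int) (out : List Int) : Decidable (Spec_find_winning_progression k numbers out) := by unfold Spec_find_winning_progression; infer_instance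

-- ===== CLAIM (what is proved, stated in full; the proofs are below) =====
def Claim_equal_find_winning_progression : Prop := ∀ (k : Int) (numbers : List Int), Dom_find_winning_progression k numbers → Spec_find_winning_progression k numbers (find_winning_progression k numbers)

-- ===== LEMMAS AND PROOFS =====

-- reference run length: pvRun s fuel a b counts the consecutive AP terms a, b, 2b-a, ... in s
-- (2 for the seen pair, plus the chain beyond b); fuel only needs to cover elements above b
def pvRun (s : PySem.Set Int) : Nat → Int → Int → Int
  | 0, _, _ => 2
  | fuel + 1, a, b =>
    if PySem.Set.contains s (2 * b - a) then pvRun s fuel b (2 * b - a) + 1 else 2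

def pvCnt (v : List Int) (b : Int) : Nat := v.countP (fun x => decide (b < x))

lemma pvCnt_lt (v : List Int) {b c : Int} (hc : c ∈ v) (hbc : b < c) :
    pvCnt v c < pvCnt v b := by
  induction v with
  | nil => simp at hc
  | cons x t ih =>
    simp only [pvCnt, List.countP_cons] at *
    rcases List.mem_cons.mp hc with rfl | hx
    · have hle : t.countP (fun x => decide (c < x)) ≤ t.countP (fun x => decide (b < x)) :=
        List.countP_mono_left (by intro y _ h; simp at h ⊢; omega)
      simp [hbc]
      omega
    · have := ih hx
      have h2 : (if (decide (b < x)) = true then 1 else 0) ≥ (if (decide (c < x)) = true then 1 else 0) := by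
        by_cases h : c < x
        · simp [h, show b < x by omega]
        · simp [h]
      omega

lemma pvRun_stable (s : PySem.Set Int) (v : List Int) (hs : ∀ x, x ∈ s ↔ x ∈ v)
    (f : Nat) (a b : Int) (hab : a < b) (hf : pvCnt v b ≤ f) :
    pvRun s (f + 1) a b = pvRun s f a b := by
  induction f generalizing a b with
  | zero =>
    simp only [pvRun]
    split
    · rename_i hcs
      exfalso
      have hcv : (2 * b - a) ∈ v := (hs _).mp (by simpa using hcs)
      have := pvCnt_lt v (b := b) hcv (by omega)
      omega
    · rfl
  | succ g ih =>
    have h1 : pvRun s (g + 1 + 1) a b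
        = if PySem.Set.contains s (2 * b - a) then pvRun s (g + 1) b (2 * b - a) + 1 else 2 := rfl
    have h2 : pvRun s (g + 1) a b
        = if PySem.Set.contains s (2 * b - a) then pvRun s g b (2 * b - a) + 1 else 2 := rfl
    rw [h1, h2]
    split
    · rename_i hcs
      have hcv : (2 * b - a) ∈ v := (hs _).mp (by simpa using hcs)
      have hlt := pvCnt_lt v (b := b) hcv (by omega)
      rw [ih b (2 * b - a) (by omega) (by omega)]
    · rfl

lemma pvRun_ge_two (s : PySem.Set Int) (f : Nat) (a b : Int) : 2 ≤ pvRun s f a b := by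
  cases f with
  | zero => simp [pvRun]
  | succ g =>
    simp only [pvRun]
    split
    · have := pvRun_ge_two s g b (2 * b - a)
      omega
    · omega

lemma pvRun_ge_iff (s : PySem.Set Int) (v : List Int) (hs : ∀ x, x ∈ s ↔ x ∈ v)
    (K : Nat) :
    ∀ (f : Nat) (a b : Int), a ∈ s → b ∈ s → a < b → pvCnt v b ≤ f →
    (((K : Nat) : Int) ≤ pvRun s f a b ↔ ∀ m : Nat, m < K → (a + m * (b - a)) ∈ s) := by
  induction K using Nat.strong_induction_on with
  | _ K ih =>
  intro f a b ha hb hab hf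
  by_cases hK2 : K ≤ 2
  · constructor
    · intro _ m hm
      match m, hm with
      | 0, _ => simpa using ha
      | 1, _ =>
        have e : a + ((1 : Nat) : Int) * (b - a) = b := by push_cast; ring
        rw [e]; exact hb
      | (m + 2), hm => exact absurd hm (by omega)
    · intro _
      have := pvRun_ge_two s f a b
      omega
  · -- K ≥ 3
    have hK3 : 3 ≤ K := by omega
    set c := 2 * b - a with hc
    have hbc : b < c := by omega
    have habc : c - b = b - a := by omega
    cases f with
    | zero =>
      have hcnt : pvCnt v b = 0 := by omega
      constructor
      · intro h
        exfalso
        simp only [pvRun] at h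
        omega
      · intro h
        exfalso
        have hcs : c ∈ s := by
          have := h 2 (by omega)
          have e : a + (2 : Nat) * (b - a) = c := by push_cast; ring
          rwa [e] at this
        have hcv : c ∈ v := (hs _).mp hcs
        have := pvCnt_lt v (b := b) hcv hbc
        omega
    | succ g =>
      have hunf : pvRun s (g + 1) a b
          = if PySem.Set.contains s c then pvRun s g b c + 1 else 2 := rfl
      by_cases hcs : c ∈ s
      · have hcb : PySem.Set.contains s c = true := by
          simpa [PySem.Set.contains_iff] using hcs
        rw [hunf, if_pos hcb]
        have hcv : c ∈ v := (hs _).mp hcs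
        have hcnt : pvCnt v c ≤ g := by
          have := pvCnt_lt v (b := b) hcv hbc
          omega
        have ihKm1 := ih (K - 1) (by omega) g b c hb hcs hbc hcnt
        constructor
        · intro h m hm
          match m, hm with
          | 0, _ => simpa using ha
          | (m' + 1), hm =>
            have h2 := (ihKm1.mp (by omega)) m' (by omega)
            have e : b + (m' : Int) * (c - b) = a + ((m' + 1 : Nat) : Int) * (b - a) := by
              push_cast; rw [habc]; ring
            rwa [e] at h2
        · intro h
          have h2 : ((K - 1 : Nat) : Int) ≤ pvRun s g b c := by
            apply ihKm1.mpr
            intro m hm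
            have := h (m + 1) (by omega)
            have e : b + (m : Int) * (c - b) = a + ((m + 1 : Nat) : Int) * (b - a) := by
              push_cast; rw [habc]; ring
            rw [e]; exact this
          push_cast at h2 ⊢
          omega
      · rw [hunf, if_neg (by simpa [PySem.Set.contains_iff] using hcs)]
        constructor
        · intro h; exfalso; push_cast at h; omega
        · intro h
          exfalso
          have := h 2 (by omega)
          have e : a + ((2 : Nat) : Int) * (b - a) = c := by push_cast; ring
          rw [e] at this
          exact hcs this

lemma pvProgLoopA_eq (s : PySem.Set Int) (a d : Int) :
    ∀ (ms acc : List Int),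
      pvProgLoopA s a d ms acc
        = acc ++ (ms.takeWhile (fun m => PySem.Set.contains s (a + m * d))).map
            (fun m => a + m * d) := by
  intro ms
  induction ms with
  | nil => intro acc; simp [pvProgLoopA]
  | cons m ms ih =>
    intro acc
    by_cases h : PySem.Set.contains s (a + m * d) = true
    · simp only [pvProgLoopA, ih, List.takeWhile_cons, h]
      simp
    · simp only [pvProgLoopA, List.takeWhile_cons]
      rw [if_neg h, Bool.eq_false_iff.mpr h]
      simp

lemma pvProgA_cond (s : PySem.Set Int) (a d k : Int) (hk : 1 ≤ k) :
    (((pvProgLoopA s a d (PySem.List.pyRange 0 k 1) []).length : Int) = k)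
      ↔ ∀ m ∈ PySem.List.pyRange 0 k 1, (a + m * d) ∈ s := by
  rw [pvProgLoopA_eq]
  have hlen : ((PySem.List.pyRange 0 k 1).length : Int) = k := by
    rw [PySem.List.length_pyRange_one]; omega
  constructor
  · intro h m hm
    have heq : (PySem.List.pyRange 0 k 1).takeWhile (fun m => PySem.Set.contains s (a + m * d))
        = PySem.List.pyRange 0 k 1 := by
      apply (List.takeWhile_prefix _).eq_of_length
      simp only [List.nil_append, List.length_map] at h
      omega
    have := List.mem_takeWhile_imp (p := fun m => PySem.Set.contains s (a + m * d))
      (l := PySem.List.pyRange 0 k 1) (x := m) (by rw [heq]; exact hm)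
    exact (PySem.Set.contains_iff s _).mp this
  · intro h
    have heq : (PySem.List.pyRange 0 k 1).takeWhile (fun m => PySem.Set.contains s (a + m * d))
        = PySem.List.pyRange 0 k 1 :=
      List.takeWhile_eq_self_iff.mpr (fun m hm => (PySem.Set.contains_iff s _).mpr (h m hm))
    simp only [List.nil_append, List.length_map, heq]
    exact hlen

lemma pvProgA_out (s : PySem.Set Int) (a d k : Int)
    (h : ∀ m ∈ PySem.List.pyRange 0 k 1, (a + m * d) ∈ s) :
    pvProgLoopA s a d (PySem.List.pyRange 0 k 1) []
      = (PySem.List.pyRange 0 k 1).map (fun m => a + m * d) := by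
  rw [pvProgLoopA_eq]
  have heq : (PySem.List.pyRange 0 k 1).takeWhile (fun m => PySem.Set.contains s (a + m * d))
      = PySem.List.pyRange 0 k 1 :=
    List.takeWhile_eq_self_iff.mpr (fun m hm => (PySem.Set.contains_iff s _).mpr (h m hm))
  rw [heq, List.nil_append]

lemma pvGetD_lt {v : List Int} (strict : v.Pairwise (· < ·)) {p q : Nat}
    (hpq : p < q) (hq : q < v.length) : v.getD p 0 < v.getD q 0 := by
  rw [List.getD_eq_getElem v 0 (by omega), List.getD_eq_getElem v 0 hq]
  exact List.pairwise_iff_getElem.mp strict p q (by omega) hq hpq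

lemma pvGetD_inj {v : List Int} (strict : v.Pairwise (· < ·)) {p q : Nat}
    (hp : p < v.length) (hq : q < v.length) (h : v.getD p 0 = v.getD q 0) : p = q := by
  rcases Nat.lt_trichotomy p q with hlt | heq | hgt
  · exact absurd h (ne_of_lt (pvGetD_lt strict hlt hq))
  · exact heq
  · exact absurd h.symm (ne_of_lt (pvGetD_lt strict hgt hp))

lemma pvCnt_lt_length {v : List Int} {c : Int} (hc : c ∈ v) : pvCnt v c < v.length := by
  have h1 : pvCnt v c ≤ v.length := List.countP_le_length
  rcases Nat.lt_or_ge (pvCnt v c) v.length with h | h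
  · exact h
  · exfalso
    have : pvCnt v c = v.length := by omega
    have := (List.countP_eq_length.mp this) c hc
    simp at this

def pvDoneFrom (s : PySem.Set Int) (v : List Int) (run : PySem.Dict (Int × Int) Int)
    (m : Nat) : Prop :=
  ∀ p q : Nat, m ≤ p → p < q → q < v.length →
    PySem.Dict.get? run (v.getD p 0, v.getD q 0)
      = some (pvRun s v.length (v.getD p 0) (v.getD q 0))

def pvDoneRow (s : PySem.Set Int) (v : List Int) (run : PySem.Dict (Int × Int) Int)
    (i j0 : Nat) : Prop :=
  pvDoneFrom s v run (i + 1) ∧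
  ∀ q : Nat, i < q → q < j0 → q < v.length →
    PySem.Dict.get? run (v.getD i 0, v.getD q 0)
      = some (pvRun s v.length (v.getD i 0) (v.getD q 0))

lemma pvBuild_step {s : PySem.Set Int} {v : List Int}
    (strict : v.Pairwise (· < ·)) (hs : ∀ x, x ∈ s ↔ x ∈ v)
    {run : PySem.Dict (Int × Int) Int} {i j : Nat}
    (hij : i < j) (hj : j < v.length) (hrow : pvDoneRow s v run i j) :
    pvDoneRow s v
      (PySem.Dict.insert run (v.getD i 0, v.getD j 0)
        (if PySem.Set.contains s (2 * v.getD j 0 - v.getD i 0)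
          then PySem.Dict.getD run (v.getD j 0, 2 * v.getD j 0 - v.getD i 0) 0 + 1 else 2))
      i (j + 1) := by
  set a := v.getD i 0 with ha
  set b := v.getD j 0 with hb
  set c := 2 * b - a with hc
  have hab : a < b := pvGetD_lt strict hij hj
  have hbc : b < c := by omega
  have hmema : a ∈ v := by rw [ha]; rw [List.getD_eq_getElem v 0 (by omega)]; exact List.getElem_mem _
  have hmemb : b ∈ v := by rw [hb]; rw [List.getD_eq_getElem v 0 hj]; exact List.getElem_mem _
  have hn1 : v.length = (v.length - 1) + 1 := by omega
  -- the inserted value is pvRun s v.length a b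
  have hval : (if PySem.Set.contains s c
        then PySem.Dict.getD run (b, c) 0 + 1 else 2) = pvRun s v.length a b := by
    by_cases hcs : c ∈ s
    · rw [if_pos ((PySem.Set.contains_iff s c).mpr hcs)]
      have hcv : c ∈ v := (hs c).mp hcs
      obtain ⟨t, htlt, htv⟩ := List.mem_iff_getElem.mp hcv
      have htD : v.getD t 0 = c := by rw [List.getD_eq_getElem v 0 htlt]; exact htv
      have hjt : j < t := by
        rcases Nat.lt_trichotomy j t with h | h | h
        · exact h
        · exfalso; rw [← h] at htD; omega
        · exfalso; have := pvGetD_lt strict h hj; omega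
      have hget := hrow.1 j t (by omega) hjt htlt
      rw [htD] at hget
      have hgetD : PySem.Dict.getD run (b, c) 0 = pvRun s v.length b c := by
        rw [PySem.Dict.getD_eq_get?_getD, hget]; rfl
      rw [hgetD]
      -- unfold pvRun at (a, b) once
      have hunf : pvRun s ((v.length - 1) + 1) a b
          = if PySem.Set.contains s c then pvRun s (v.length - 1) b c + 1 else 2 := rfl
      rw [hn1, hunf, if_pos ((PySem.Set.contains_iff s c).mpr hcs)]
      have hst : pvRun s ((v.length - 1) + 1) b c = pvRun s (v.length - 1) b c :=
        pvRun_stable s v hs (v.length - 1) b c hbc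
          (by have := pvCnt_lt_length hcv; omega)
      rw [← hn1] at hst ⊢
      rw [hst]
    · rw [if_neg (by simpa [PySem.Set.contains_iff] using hcs)]
      have hunf : pvRun s ((v.length - 1) + 1) a b
          = if PySem.Set.contains s c then pvRun s (v.length - 1) b c + 1 else 2 := rfl
      rw [hn1, hunf, if_neg (by simpa [PySem.Set.contains_iff] using hcs)]
  rw [hval]
  constructor
  · intro p q hp hpq hq
    have hne : (v.getD p 0, v.getD q 0) ≠ (a, b) := by
      intro h
      have h1 : v.getD p 0 = a := congrArg Prod.fst h
      have := pvGetD_inj strict (by omega) (by omega) h1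
      omega
    rw [PySem.Dict.get?_insert_of_ne run _ hne]
    exact hrow.1 p q hp hpq hq
  · intro q hiq hqj hq
    by_cases hqeq : q = j
    · subst hqeq
      rw [PySem.Dict.get?_insert_self]
    · have hne : (v.getD i 0, v.getD q 0) ≠ (a, b) := by
        intro h
        have h2 : v.getD q 0 = b := congrArg Prod.snd h
        have := pvGetD_inj strict (by omega) (by omega) h2
        omega
      rw [PySem.Dict.get?_insert_of_ne run _ hne]
      exact hrow.2 q hiq (by omega) hq

lemma pvBuild_inner {s : PySem.Set Int} {v : List Int}
    (strict : v.Pairwise (· < ·)) (hs : ∀ x, x ∈ s ↔ x ∈ v)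
    (iN : Nat) :
    ∀ (fuel jN : Nat), iN < jN → jN + fuel = v.length →
    ∀ run, pvDoneRow s v run iN jN →
    pvDoneRow s v
      ((PySem.List.pyRange (jN : Int) (v.length : Int) 1).foldl
        (fun run j =>
          PySem.Dict.insert run (PySem.List.pyGetD v (iN : Int) 0, PySem.List.pyGetD v j 0)
            (if PySem.Set.contains s (2 * PySem.List.pyGetD v j 0 - PySem.List.pyGetD v (iN : Int) 0)
              then PySem.Dict.getD run
                (PySem.List.pyGetD v j 0,
                  2 * PySem.List.pyGetD v j 0 - PySem.List.pyGetD v (iN : Int) 0) 0 + 1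
              else 2))
        run)
      iN v.length := by
  intro fuel
  induction fuel with
  | zero =>
    intro jN hij hlen run hrow
    have hjn : jN = v.length := by omega
    subst hjn
    rw [PySem.List.pyRange_one_eq_nil le_rfl]
    simpa using hrow
  | succ f ih =>
    intro jN hij hlen run hrow
    have hjn : (jN : Int) < (v.length : Int) := by exact_mod_cast (by omega : jN < v.length)
    rw [PySem.List.pyRange_one_cons hjn]
    rw [List.foldl_cons]
    have hcast : (jN : Int) + 1 = ((jN + 1 : Nat) : Int) := by push_cast; ring
    rw [hcast]
    apply ih (jN + 1) (by omega) (by omega)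
    have hstep := pvBuild_step strict hs (run := run) hij (by omega) hrow
    simpa [PySem.List.pyGetD_natCast] using hstep

lemma pvBuild_outer {s : PySem.Set Int} {v : List Int}
    (strict : v.Pairwise (· < ·)) (hs : ∀ x, x ∈ s ↔ x ∈ v) :
    ∀ (m : Nat), m ≤ v.length →
    ∀ run, pvDoneFrom s v run m →
    pvDoneFrom s v
      ((PySem.List.pyRange ((m : Int) - 1) (-1) (-1)).foldl
        (fun run i =>
          (PySem.List.pyRange (i + 1) (v.length : Int) 1).foldl
            (fun run j =>
              PySem.Dict.insert run (PySem.List.pyGetD v i 0, PySem.List.pyGetD v j 0)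
                (if PySem.Set.contains s (2 * PySem.List.pyGetD v j 0 - PySem.List.pyGetD v i 0)
                  then PySem.Dict.getD run
                    (PySem.List.pyGetD v j 0,
                      2 * PySem.List.pyGetD v j 0 - PySem.List.pyGetD v i 0) 0 + 1
                  else 2))
            run)
        run)
      0 := by
  intro m
  induction m with
  | zero =>
    intro _ run hrun
    rw [show ((0 : Nat) : Int) - 1 = -1 by norm_num]
    rw [PySem.List.pyRange_neg_one_eq_nil le_rfl]
    simpa using hrun
  | succ m ih =>
    intro hm run hrun
    rw [show (((m + 1 : Nat) : Int)) - 1 = (m : Int) by push_cast; ring]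
    rw [PySem.List.pyRange_neg_one_cons (show (-1:Int) < (m:Int) by omega)]
    rw [List.foldl_cons]
    apply ih (by omega)
    -- the inner fold establishes row i = m completely
    have hrow0 : pvDoneRow s v run m (m + 1) := by
      refine ⟨hrun, ?_⟩
      intro q h1 h2 _
      omega
    have hinner := pvBuild_inner strict hs m (v.length - (m + 1)) (m + 1)
      (by omega) (by omega) run hrow0
    have hcast : ((m : Int)) + 1 = ((m + 1 : Nat) : Int) := by push_cast; ring
    rw [hcast]
    intro p q hp hpq hq
    rcases Nat.eq_or_lt_of_le hp with heq | hlt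
    · subst heq
      exact hinner.2 q (by omega) (by omega) hq
    · exact hinner.1 p q (by omega) hpq hq

lemma pvBuildB_spec {s : PySem.Set Int} {v : List Int}
    (strict : v.Pairwise (· < ·)) (hs : ∀ x, x ∈ s ↔ x ∈ v) :
    pvDoneFrom s v (pvBuildB s v) 0 := by
  have h := pvBuild_outer strict hs v.length le_rfl PySem.Dict.empty
    (by intro p q hp hpq hq; omega)
  exact h

lemma pvJLoopA_nonpos {k : Int} (hk : k ≤ 0) (s : PySem.Set Int) (v : List Int) (i : Int) :
    ∀ js, pvJLoopA k s v i js = none ∨ pvJLoopA k s v i js = some [] := by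
  intro js
  induction js with
  | nil => left; rfl
  | cons j js ih =>
    simp only [pvJLoopA, PySem.List.pyRange_one_eq_nil hk]
    split
    · right; rfl
    · exact ih

lemma pvILoopA_nonpos {k : Int} (hk : k ≤ 0) (s : PySem.Set Int) (v : List Int) :
    ∀ is, pvILoopA k s v is = none ∨ pvILoopA k s v is = some [] := by
  intro is
  induction is with
  | nil => left; rfl
  | cons i is ih =>
    simp only [pvILoopA]
    rcases pvJLoopA_nonpos hk s v i (PySem.List.pyRange (i + 1) (v.length : Int) 1)
      with h | h <;> rw [h]
    · exact ih
    · right; rfl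

lemma pvScanBJ_nonpos {k : Int} (hk : k ≤ 0) (v : List Int)
    (run : PySem.Dict (Int × Int) Int) (i : Int) :
    ∀ js, pvScanBJ k v run i js = none ∨ pvScanBJ k v run i js = some [] := by
  intro js
  induction js with
  | nil => left; rfl
  | cons j js ih =>
    simp only [pvScanBJ, PySem.List.pyRange_one_eq_nil hk, List.map_nil]
    split
    · right; rfl
    · exact ih

lemma pvScanBI_nonpos {k : Int} (hk : k ≤ 0) (v : List Int)
    (run : PySem.Dict (Int × Int) Int) :
    ∀ is, pvScanBI k v run is = none ∨ pvScanBI k v run is = some [] := by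
  intro is
  induction is with
  | nil => left; rfl
  | cons i is ih =>
    simp only [pvScanBI]
    rcases pvScanBJ_nonpos hk v run i (PySem.List.pyRange (i + 1) (v.length : Int) 1)
      with h | h <;> rw [h]
    · exact ih
    · right; rfl

lemma pvScanJ_eq {s : PySem.Set Int} {v : List Int} {run : PySem.Dict (Int × Int) Int} {k : Int}
    (strict : v.Pairwise (· < ·)) (hs : ∀ x, x ∈ s ↔ x ∈ v) (hk : 1 ≤ k)
    (hrun : pvDoneFrom s v run 0)
    (i : Int) (hi0 : 0 ≤ i) :
    ∀ js, (∀ j ∈ js, i < j ∧ j < (v.length : Int)) →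
      pvJLoopA k s v i js = pvScanBJ k v run i js := by
  intro js
  induction js with
  | nil => intro _; rfl
  | cons j js ih =>
    intro hjs
    obtain ⟨hij, hjn⟩ := hjs j List.mem_cons_self
    have hj0 : 0 ≤ j := by omega
    set p := i.toNat with hp
    set q := j.toNat with hq
    have hpi : (p : Int) = i := Int.toNat_of_nonneg hi0
    have hqj : (q : Int) = j := Int.toNat_of_nonneg hj0
    have hpq : p < q := by omega
    have hqn : q < v.length := by omega
    have haD : PySem.List.pyGetD v i 0 = v.getD p 0 := PySem.List.pyGetD_of_nonneg v 0 hi0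
    have hbD : PySem.List.pyGetD v j 0 = v.getD q 0 := PySem.List.pyGetD_of_nonneg v 0 hj0
    set a := v.getD p 0 with ha'
    set b := v.getD q 0 with hb'
    have hab : a < b := pvGetD_lt strict hpq hqn
    have hma : a ∈ v := by
      rw [ha', List.getD_eq_getElem v 0 (by omega)]; exact List.getElem_mem _
    have hmb : b ∈ v := by
      rw [hb', List.getD_eq_getElem v 0 hqn]; exact List.getElem_mem _
    have has : a ∈ s := (hs a).mpr hma
    have hbs : b ∈ s := (hs b).mpr hmb
    have hget := hrun p q (Nat.zero_le p) hpq hqn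
    have hgetD : PySem.Dict.getD run (a, b) 0 = pvRun s v.length a b := by
      rw [PySem.Dict.getD_eq_get?_getD, hget]; rfl
    -- both conditions are equivalent to every candidate being present
    have hmemiff : (∀ m ∈ PySem.List.pyRange 0 k 1, (a + m * (b - a)) ∈ s)
        ↔ (∀ mN : Nat, mN < k.toNat → (a + (mN : Int) * (b - a)) ∈ s) := by
      constructor
      · intro h mN hmN
        exact h (mN : Int) (PySem.List.mem_pyRange_one.mpr ⟨by omega, by omega⟩)
      · intro h m hm
        obtain ⟨hm0, hmk⟩ := PySem.List.mem_pyRange_one.mp hm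
        have := h m.toNat (by omega)
        rwa [Int.toNat_of_nonneg hm0] at this
    have hcondB : (k ≤ PySem.Dict.getD run (a, b) 0)
        ↔ (∀ m ∈ PySem.List.pyRange 0 k 1, (a + m * (b - a)) ∈ s) := by
      rw [hgetD, hmemiff]
      have hiff := pvRun_ge_iff s v hs k.toNat v.length a b has hbs hab
        (List.countP_le_length)
      rw [show ((k.toNat : Nat) : Int) = k by omega] at hiff
      exact hiff
    have hcondA : (((pvProgLoopA s a (b - a) (PySem.List.pyRange 0 k 1) []).length : Int) = k)
        ↔ (∀ m ∈ PySem.List.pyRange 0 k 1, (a + m * (b - a)) ∈ s) :=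
      pvProgA_cond s a (b - a) k hk
    simp only [pvJLoopA, pvScanBJ, haD, hbD]
    by_cases hP : ∀ m ∈ PySem.List.pyRange 0 k 1, (a + m * (b - a)) ∈ s
    · rw [if_pos (hcondA.mpr hP), if_pos (hcondB.mpr hP)]
      rw [pvProgA_out s a (b - a) k hP]
    · rw [if_neg (fun h => hP (hcondA.mp h)), if_neg (fun h => hP (hcondB.mp h))]
      exact ih (fun j' hj' => hjs j' (List.mem_cons_of_mem j hj'))

lemma pvScanI_eq {s : PySem.Set Int} {v : List Int} {run : PySem.Dict (Int × Int) Int} {k : Int}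
    (strict : v.Pairwise (· < ·)) (hs : ∀ x, x ∈ s ↔ x ∈ v) (hk : 1 ≤ k)
    (hrun : pvDoneFrom s v run 0) :
    ∀ is, (∀ i ∈ is, 0 ≤ i) → pvILoopA k s v is = pvScanBI k v run is := by
  intro is
  induction is with
  | nil => intro _; rfl
  | cons i is ih =>
    intro his
    simp only [pvILoopA, pvScanBI]
    rw [pvScanJ_eq strict hs hk hrun i (his i List.mem_cons_self)
      (PySem.List.pyRange (i + 1) (v.length : Int) 1)
      (fun j hj => by
        obtain ⟨h1, h2⟩ := PySem.List.mem_pyRange_one.mp hj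
        exact ⟨by omega, h2⟩)]
    cases pvScanBJ k v run i (PySem.List.pyRange (i + 1) (v.length : Int) 1) with
    | none => exact ih (fun i' hi' => his i' (List.mem_cons_of_mem i hi'))
    | some p => rfl

theorem find_winning_progression_spec : Claim_equal_find_winning_progression := by
  intro k numbers _
  unfold Spec_find_winning_progression
  set s := PySem.Set.ofList numbers with hsdef
  set v := PySem.List.sorted s (fun x => x) false with hvdef
  have hA : find_winning_progression k numbers
      = (pvILoopA k s v (PySem.List.pyRange 0 (v.length : Int) 1)).getD [] := rfl
  have hB : find_winning_progression_alt k numbers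
      = (pvScanBI k v (pvBuildB s v) (PySem.List.pyRange 0 (v.length : Int) 1)).getD [] := rfl
  rw [hA, hB]
  have strict : v.Pairwise (· < ·) := PySem.List.sorted_ofList_pairwise_lt numbers
  have hs : ∀ x, x ∈ s ↔ x ∈ v := fun x => (PySem.List.mem_sorted s (fun x => x) false x).symm
  rcases (by omega : k ≤ 0 ∨ 1 ≤ k) with hk | hk
  · rcases pvILoopA_nonpos hk s v (PySem.List.pyRange 0 (v.length : Int) 1) with h | h <;>
      rcases pvScanBI_nonpos hk v (pvBuildB s v) (PySem.List.pyRange 0 (v.length : Int) 1)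
        with h' | h' <;> rw [h, h'] <;> rfl
  · rw [pvScanI_eq strict hs hk (pvBuildB_spec strict hs)
      (PySem.List.pyRange 0 (v.length : Int) 1)
      (fun i hi => (PySem.List.mem_pyRange_one.mp hi).1)]
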